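-- pv_equiv track=rewrite | github.com/jessekrubin/pyEuler | not_done/euler_145.py | reversable_numbers_below
-- ===== SOURCE A (Python) =====
-- def reverse(n):
--     reversed = 0
--     while n > 0:
--         reversed *= 10
--         reversed += n % 10
--         n //= 10
--     return reversed
--
-- def is_reversible(n):
--     if n % 10 == 0:
--         return False
--     soom = n + reverse(n)
--     cur_dig = 0
--     while soom > 0:
--         cur_dig = soom % 10
--         if cur_dig % 2 == 0:
--             return False
--         soom //= 10
--     return True
--
-- def reversable_numbers_below(n):
--     seen = set()
--     count = 0
--     for i in range(1, n):
--         if i not in seen: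
--             if is_reversible(i):
--                 ri = reverse(i)
--                 if i == ri:
--                     count += 1
--                 else:
--                     seen.add(ri)
--                     seen.add(i)
--                     count += 2
--     return count
-- ===== SOURCE B (Python) =====
-- def to_digits(n):
--     # least-significant-first digit list of n (empty for n <= 0)
--     if n <= 0:
--         return []
--     q, r = divmod(n, 10)
--     return [r] + to_digits(q)
--
-- def reversable_numbers_below(n):
--     # digit-list formulation: build i's digit list once; the reversed number is a
--     # fold over it, the all-odd test is a predicate over the digit list of i + r.
--     # Each reversible pair {i, reverse(i)} is counted once at its smaller member
--     # (a reversible number is never a palindrome), so no 'seen' set is needed.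
--     count = 0
--     for i in range(1, n):
--         ds = to_digits(i)
--         if ds and ds[0] != 0:
--             r = 0
--             for d in ds:
--                 r = r * 10 + d
--             if i < r and all(d % 2 == 1 for d in to_digits(i + r)):
--                 count += 2
--     return count
-- ===== Notes on version B (the rewrite author's own statement) =====
-- stated objective: alternative
-- what changed: B replaces A's seen-set bookkeeping and while-loop arithmetic by a digit-list formulation: each i's digits are materialised once as a list, the reversed number is a fold over that list, the all-odd test is a predicate over the digit list of i+reverse(i), and each reversible pair is counted once at its smaller member so no set is kept.
import Mathlib
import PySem

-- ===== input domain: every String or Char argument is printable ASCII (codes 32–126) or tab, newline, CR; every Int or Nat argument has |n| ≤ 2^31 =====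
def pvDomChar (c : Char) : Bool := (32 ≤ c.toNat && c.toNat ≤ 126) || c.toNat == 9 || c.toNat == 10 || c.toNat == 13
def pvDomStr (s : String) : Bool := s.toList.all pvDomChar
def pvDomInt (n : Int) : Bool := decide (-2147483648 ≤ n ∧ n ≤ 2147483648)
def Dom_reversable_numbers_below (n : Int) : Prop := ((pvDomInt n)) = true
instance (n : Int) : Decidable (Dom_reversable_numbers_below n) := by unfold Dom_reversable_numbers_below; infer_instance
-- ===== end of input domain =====

-- B recasts A in digit-list form (digits built once per i, reverse as a fold, all-odd as a
-- list predicate) and counts each reversible pair once at its smaller member, with no set.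

-- ===== PORT A =====

-- reverse(n): while n > 0: reversed = reversed*10 + n%10; n //= 10
def pyReverseGo (n acc : Int) : Int :=
  if _h : 0 < n then
    pyReverseGo (PySem.Int.floordiv n 10) (acc * 10 + PySem.Int.mod n 10)
  else acc
termination_by n.toNat
decreasing_by
  rw [PySem.Int.floordiv_eq_ediv_of_pos (by norm_num : (0:Int) < 10)]
  omega

def pyReverse (n : Int) : Int := pyReverseGo n 0

-- the 'while soom > 0' digit-parity loop of is_reversible
def pyOddDigitsGo (soom : Int) : Bool :=
  if _h : 0 < soom then
    if PySem.Int.mod (PySem.Int.mod soom 10) 2 == 0 then false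
    else pyOddDigitsGo (PySem.Int.floordiv soom 10)
  else true
termination_by soom.toNat
decreasing_by
  rw [PySem.Int.floordiv_eq_ediv_of_pos (by norm_num : (0:Int) < 10)]
  omega

def py_is_reversible (n : Int) : Bool :=
  if PySem.Int.mod n 10 == 0 then false
  else pyOddDigitsGo (n + pyReverse n)

-- loop body of A's 'for i in range(1, n)' (branches in Python order)
def revStepA (st : PySem.Set Int × Int) (i : Int) : PySem.Set Int × Int :=
  if !(PySem.Set.contains st.1 i) then
    if py_is_reversible i then
      let ri := pyReverse i
      if i == ri then (st.1, st.2 + 1)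
      else (PySem.Set.add (PySem.Set.add st.1 ri) i, st.2 + 2)
    else st
  else st

def reversable_numbers_below (n : Int) : Int :=
  ((PySem.List.pyRange 1 n 1).foldl revStepA ((PySem.Set.empty : PySem.Set Int), (0:Int))).2

-- ===== PORT B =====

-- to_digits(n): least-significant-first digit list, [] for n <= 0 (recursive, as in Source B)
def toDigitsB (n : Int) : List Int :=
  if _h : n ≤ 0 then []
  else
    -- q, r = divmod(n, 10)
    let q := PySem.Int.floordiv n 10
    let r := PySem.Int.mod n 10
    r :: toDigitsB q
termination_by n.toNat
decreasing_by
  rw [PySem.Int.floordiv_eq_ediv_of_pos (by norm_num : (0:Int) < 10)]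
  omega

-- body of 'if ds and ds[0] != 0: … count += 2' in Source B (ds[0] on a nonempty list = headD)
def bStep (count i : Int) : Int :=
  let ds := toDigitsB i
  if ds ≠ [] ∧ ds.headD 0 ≠ 0 then
    let r := ds.foldl (fun r d => r * 10 + d) 0
    if i < r ∧ (toDigitsB (i + r)).all (fun d => PySem.Int.mod d 2 == 1) = true
    then count + 2 else count
  else count

def reversable_numbers_below_alt (n : Int) : Int :=
  (PySem.List.pyRange 1 n 1).foldl bStep 0

-- ===== PRECONDITION & SPEC =====
def Spec_reversable_numbers_below (n : Int) (out : Int) : Prop := out = reversable_numbers_below_alt n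
instance (n : Int) (out : Int) : Decidable (Spec_reversable_numbers_below n out) := by unfold Spec_reversable_numbers_below; infer_instance

-- ===== CLAIM (what is proved, stated in full; the proofs are below) =====
def Claim_equal_reversable_numbers_below : Prop := ∀ (n : Int), Dom_reversable_numbers_below n → Spec_reversable_numbers_below n (reversable_numbers_below n)

-- ===== LEMMAS AND PROOFS =====

-- the common per-index contribution both loops are reduced to
def gContrib (i : Int) : Int :=
  if i < pyReverse i ∧ py_is_reversible i = true then 1 else 0

-- Nat-level digit reversal, used only in proofs
def natRev (N : Nat) : Nat := Nat.ofDigits 10 ((Nat.digits 10 N).reverse)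

lemma pyReverseGo_natCast (N : Nat) : ∀ acc : Int,
    pyReverseGo (N : Int) acc
      = (natRev N : Int) + acc * 10 ^ (Nat.digits 10 N).length := by
  induction N using Nat.strong_induction_on with
  | _ N ih =>
    intro acc
    rcases Nat.eq_zero_or_pos N with h0 | h0
    · subst h0
      rw [pyReverseGo]
      simp [natRev]
    · rw [pyReverseGo]
      have hc : (0:Int) < (N:Int) := by exact_mod_cast h0
      rw [dif_pos hc]
      have hfd : PySem.Int.floordiv (N:Int) 10 = ((N / 10 : Nat) : Int) := by
        exact_mod_cast PySem.Int.floordiv_natCast N 10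
      have hmd : PySem.Int.mod (N:Int) 10 = ((N % 10 : Nat) : Int) := by
        exact_mod_cast PySem.Int.mod_natCast N 10
      rw [hfd, hmd, ih (N / 10) (Nat.div_lt_self h0 (by norm_num))]
      have hdig : Nat.digits 10 N = N % 10 :: Nat.digits 10 (N / 10) :=
        Nat.digits_def' (by norm_num) h0
      rw [natRev, natRev, hdig]
      simp only [List.reverse_cons, Nat.ofDigits_append, Nat.ofDigits_cons,
        Nat.ofDigits_nil, List.length_reverse, List.length_cons]
      push_cast
      ring

lemma pyReverse_natCast (N : Nat) : pyReverse (N : Int) = (natRev N : Int) := by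
  rw [pyReverse, pyReverseGo_natCast]; ring

lemma digits_reverse_lt (N : Nat) : ∀ x ∈ (Nat.digits 10 N).reverse, x < 10 := by
  intro x hx
  exact Nat.digits_lt_base (by norm_num) (List.mem_reverse.mp hx)

lemma digits_reverse_getLast (N : Nat) (h : N ≠ 0) :
    ((Nat.digits 10 N).reverse).getLast? = some (N % 10) := by
  have hdig : Nat.digits 10 N = N % 10 :: Nat.digits 10 (N / 10) :=
    Nat.digits_def' (by norm_num) (Nat.pos_of_ne_zero h)
  rw [hdig]
  simp [List.getLast?_reverse]

lemma digits_natRev (N : Nat) (h : N % 10 ≠ 0) :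
    Nat.digits 10 (natRev N) = (Nat.digits 10 N).reverse := by
  have hN : N ≠ 0 := by intro h0; exact h (by simp [h0])
  apply Nat.digits_ofDigits 10 (by norm_num) _ (digits_reverse_lt N)
  intro hne
  have h1 := digits_reverse_getLast N hN
  rw [List.getLast?_eq_some_getLast hne] at h1
  rw [Option.some_inj.mp h1]
  exact h

lemma natRev_natRev (N : Nat) (h : N % 10 ≠ 0) : natRev (natRev N) = N := by
  rw [natRev, digits_natRev N h, List.reverse_reverse, Nat.ofDigits_digits]

lemma natRev_mod_ten (N : Nat) (h : N ≠ 0) : natRev N % 10 ≠ 0 := by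
  have hne : (Nat.digits 10 N).reverse ≠ [] := by
    simpa using Nat.digits_ne_nil_iff_ne_zero.mpr h
  obtain ⟨d, t, hdt⟩ := List.exists_cons_of_ne_nil hne
  have hd : d ≠ 0 := by
    have hnil : Nat.digits 10 N ≠ [] := Nat.digits_ne_nil_iff_ne_zero.mpr h
    have hlast : (Nat.digits 10 N).getLast hnil ≠ 0 :=
      Nat.getLast_digit_ne_zero 10 h
    have : (Nat.digits 10 N).reverse.head hne = (Nat.digits 10 N).getLast hnil := by
      simp [List.head_reverse]
    have hd' : (Nat.digits 10 N).reverse.head hne = d := by simp [hdt]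
    rw [hd'] at this
    rw [this]
    exact hlast
  have hd10 : d < 10 := digits_reverse_lt N d (by rw [hdt]; exact List.mem_cons_self)
  rw [natRev, hdt, Nat.ofDigits_cons]
  omega

lemma natRev_ne_zero (N : Nat) (h : N % 10 ≠ 0) : natRev N ≠ 0 := by
  intro h0
  have hN : N ≠ 0 := by intro h0'; exact h (by simp [h0'])
  exact natRev_mod_ten N hN (by simp [h0])

lemma mod_ten_toNat (x : Int) (hx : 0 ≤ x) :
    PySem.Int.mod x 10 = ((x.toNat % 10 : Nat) : Int) := by
  conv_lhs => rw [← Int.toNat_of_nonneg hx]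
  exact_mod_cast PySem.Int.mod_natCast x.toNat 10

lemma pyReverse_toNat (x : Int) (hx : 0 ≤ x) : pyReverse x = (natRev x.toNat : Int) := by
  conv_lhs => rw [← Int.toNat_of_nonneg hx]
  exact pyReverse_natCast x.toNat

lemma rev_pos (x : Int) (hx : 1 ≤ x) (h : PySem.Int.mod x 10 ≠ 0) : 1 ≤ pyReverse x := by
  rw [pyReverse_toNat x (by omega)]
  rw [mod_ten_toNat x (by omega)] at h
  have := natRev_ne_zero x.toNat (by exact_mod_cast fun h0 => h (by exact_mod_cast h0))
  omega

lemma rev_rev (x : Int) (hx : 1 ≤ x) (h : PySem.Int.mod x 10 ≠ 0) :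
    pyReverse (pyReverse x) = x := by
  rw [pyReverse_toNat x (by omega), pyReverse_natCast]
  rw [mod_ten_toNat x (by omega)] at h
  rw [natRev_natRev x.toNat (by exact_mod_cast fun h0 => h (by exact_mod_cast h0))]
  omega

lemma rev_mod_ten (x : Int) (hx : 1 ≤ x) : PySem.Int.mod (pyReverse x) 10 ≠ 0 := by
  rw [pyReverse_toNat x (by omega)]
  have h1 : (0:Int) ≤ (natRev x.toNat : Int) := by positivity
  rw [mod_ten_toNat _ h1]
  have := natRev_mod_ten x.toNat (by omega)
  simp only [Int.toNat_natCast]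
  exact_mod_cast this

lemma oddDigits_odd (s : Int) (hs : 0 < s) (h : pyOddDigitsGo s = true) : s % 2 = 1 := by
  rw [pyOddDigitsGo, dif_pos hs] at h
  by_cases hc : PySem.Int.mod (PySem.Int.mod s 10) 2 == 0
  · rw [if_pos hc] at h; exact absurd h (by simp)
  · have hc' : PySem.Int.mod (PySem.Int.mod s 10) 2 ≠ 0 := by simpa using hc
    rw [PySem.Int.mod_eq_emod_of_pos (by norm_num : (0:Int) < 10),
        PySem.Int.mod_eq_emod_of_pos (by norm_num : (0:Int) < 2)] at hc'
    omega

lemma isR_mod_ten (x : Int) (h : py_is_reversible x = true) : PySem.Int.mod x 10 ≠ 0 := by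
  rw [py_is_reversible] at h
  by_cases hc : PySem.Int.mod x 10 == 0
  · rw [if_pos hc] at h; exact absurd h (by simp)
  · simpa using hc

lemma isR_odd_loop (x : Int) (h : py_is_reversible x = true) :
    pyOddDigitsGo (x + pyReverse x) = true := by
  rw [py_is_reversible] at h
  by_cases hc : PySem.Int.mod x 10 == 0
  · rw [if_pos hc] at h; exact absurd h (by simp)
  · rwa [if_neg hc] at h

lemma isR_ne_rev (x : Int) (hx : 1 ≤ x) (h : py_is_reversible x = true) : x ≠ pyReverse x := by
  intro he
  have h1 := rev_pos x hx (isR_mod_ten x h)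
  have h2 := oddDigits_odd (x + pyReverse x) (by omega) (isR_odd_loop x h)
  rw [← he] at h2
  omega

lemma isR_rev (x : Int) (hx : 1 ≤ x) (h : py_is_reversible x = true) :
    py_is_reversible (pyReverse x) = true := by
  rw [py_is_reversible, if_neg (by simpa using rev_mod_ten x hx)]
  rw [rev_rev x hx (isR_mod_ten x h), add_comm]
  exact isR_odd_loop x h

-- which integers are in A's 'seen' set after processing range(1, m)
def seenSpec (m x : Int) : Prop :=
  py_is_reversible x = true ∧
    ((1 ≤ x ∧ x < m ∧ x < pyReverse x) ∨ (1 ≤ pyReverse x ∧ pyReverse x < m ∧ pyReverse x < x))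

lemma rev_eq_of (x i : Int) (hR : py_is_reversible x = true) (hrx : pyReverse x = i)
    (hx : 1 ≤ x) : x = pyReverse i := by
  rw [← hrx, rev_rev x hx (isR_mod_ten x hR)]

lemma step_inv (i : Int) (hi : 1 ≤ i) (st : PySem.Set Int × Int)
    (hseen : ∀ x, x ∈ st.1 ↔ seenSpec i x) :
    (∀ x, x ∈ (revStepA st i).1 ↔ seenSpec (i + 1) x) ∧
    (revStepA st i).2 = st.2 + 2 * gContrib i := by
  by_cases hmem : i ∈ st.1
  · have hc : PySem.Set.contains st.1 i = true := (PySem.Set.contains_iff st.1 i).mpr hmem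
    have hstep : revStepA st i = st := by rw [revStepA, hc]; simp
    obtain ⟨hRi, hcase⟩ := (hseen i).mp hmem
    have hlt : pyReverse i < i ∧ 1 ≤ pyReverse i := by omega
    rw [hstep]
    refine ⟨fun x => ?_, by rw [gContrib, if_neg fun h => absurd h.1 (by omega)]; ring⟩
    rw [hseen x]
    constructor
    · rintro ⟨hR, hc2⟩
      exact ⟨hR, by omega⟩
    · rintro ⟨hR, hc2⟩
      refine ⟨hR, ?_⟩
      by_cases hxi : x = i
      · subst hxi; omega
      · by_cases hrxi : pyReverse x = i
        · have hx1 : 1 ≤ x := by omega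
          have := rev_eq_of x i hR hrxi hx1
          omega
        · omega
  · have hc : PySem.Set.contains st.1 i = false := by
      cases hcc : PySem.Set.contains st.1 i
      · rfl
      · exact absurd ((PySem.Set.contains_iff st.1 i).mp hcc) hmem
    by_cases hR : py_is_reversible i = true
    · have hne := isR_ne_rev i hi hR
      have hrpos := rev_pos i hi (isR_mod_ten i hR)
      have hgt : i < pyReverse i := by
        by_contra hle
        exact hmem ((hseen i).mpr ⟨hR, Or.inr ⟨hrpos, by omega, by omega⟩⟩)
      have hbeq : (i == pyReverse i) = false := by simpa using hne
      have hstep : revStepA st i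
          = (PySem.Set.add (PySem.Set.add st.1 (pyReverse i)) i, st.2 + 2) := by
        rw [revStepA, hc, hR]; simp [hbeq]
      rw [hstep]
      refine ⟨fun x => ?_, by rw [gContrib, if_pos ⟨hgt, hR⟩]; ring⟩
      simp only [PySem.Set.mem_add]
      constructor
      · rintro ((hx | hx) | hx)
        · obtain ⟨hRx, hc2⟩ := (hseen x).mp hx
          exact ⟨hRx, by omega⟩
        · subst hx
          refine ⟨isR_rev i hi hR, Or.inr ?_⟩
          rw [rev_rev i hi (isR_mod_ten i hR)]
          omega
        · subst hx
          exact ⟨hR, Or.inl ⟨hi, by omega, hgt⟩⟩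
      · rintro ⟨hRx, hc2⟩
        by_cases hxi : x = i
        · exact Or.inr hxi
        · by_cases hrxi : pyReverse x = i
          · have hx1 : 1 ≤ x := by
              rcases hc2 with ⟨a, _, _⟩ | ⟨a, _, c⟩
              · exact a
              · omega
            exact Or.inl (Or.inr (rev_eq_of x i hRx hrxi hx1))
          · exact Or.inl (Or.inl ((hseen x).mpr ⟨hRx, by omega⟩))
    · have hstep : revStepA st i = st := by rw [revStepA, hc]; simp [hR]
      rw [hstep]
      refine ⟨fun x => ?_, by rw [gContrib, if_neg (by intro h; exact hR h.2)]; ring⟩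
      rw [hseen x]
      constructor
      · rintro ⟨hRx, hc2⟩
        exact ⟨hRx, by omega⟩
      · rintro ⟨hRx, hc2⟩
        refine ⟨hRx, ?_⟩
        by_cases hxi : x = i
        · exfalso; subst hxi; exact hR hRx
        · by_cases hrxi : pyReverse x = i
          · exfalso
            have hx1 : 1 ≤ x := by omega
            have hrr := isR_rev x hx1 hRx
            rw [hrxi] at hrr
            exact hR hrr
          · omega

def foldInv (m : Int) : Prop :=
  (∀ x, x ∈ ((PySem.List.pyRange 1 m 1).foldl revStepA ((PySem.Set.empty : PySem.Set Int), (0:Int))).1 ↔ seenSpec m x) ∧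
  ((PySem.List.pyRange 1 m 1).foldl revStepA ((PySem.Set.empty : PySem.Set Int), (0:Int))).2
    = 2 * ((PySem.List.pyRange 1 m 1).map gContrib).sum

lemma foldInv_of_le (m : Int) (hm : m ≤ 1) : foldInv m := by
  unfold foldInv
  rw [PySem.List.pyRange_one_eq_nil hm]
  constructor
  · intro x
    constructor
    · intro h
      exact absurd h (by simp [PySem.Set.empty])
    · rintro ⟨_, hc⟩
      omega
  · simp

lemma foldInv_aux (k : Nat) : foldInv (1 + (k : Int)) := by
  induction k with
  | zero => exact foldInv_of_le 1 le_rfl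
  | succ k ih =>
    unfold foldInv
    have h1 : (1:Int) ≤ 1 + (k:Int) := by omega
    have hsplit : PySem.List.pyRange 1 (1 + ((k+1 : Nat) : Int)) 1
        = PySem.List.pyRange 1 (1 + (k:Int)) 1 ++ [1 + (k:Int)] := by
      have : (1:Int) + ((k+1 : Nat) : Int) = (1 + (k:Int)) + 1 := by push_cast; ring
      rw [this]
      exact PySem.List.pyRange_one_succ_right h1
    rw [hsplit, List.foldl_append, List.map_append, List.sum_append]
    unfold foldInv at ih
    obtain ⟨hseen, hcount⟩ := ih
    obtain ⟨hseen', hcount'⟩ := step_inv (1 + (k:Int)) h1 _ hseen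
    constructor
    · intro x
      rw [List.foldl_cons, List.foldl_nil]
      have : (1:Int) + ((k+1 : Nat) : Int) = (1 + (k:Int)) + 1 := by push_cast; ring
      rw [this]
      exact hseen' x
    · rw [List.foldl_cons, List.foldl_nil, hcount', hcount]
      simp only [List.map_cons, List.map_nil, List.sum_cons, List.sum_nil]
      ring

lemma foldInv_all (m : Int) : foldInv m := by
  rcases le_or_gt m 1 with h | h
  · exact foldInv_of_le m h
  · have : (1:Int) + ((m-1).toNat : Int) = m := by omega
    rw [← this]
    exact foldInv_aux (m-1).toNat

-- B-side bridging: digit lists compute exactly A's while-loop values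

lemma toDigitsB_pos (n : Int) (h : 0 < n) :
    toDigitsB n = PySem.Int.mod n 10 :: toDigitsB (PySem.Int.floordiv n 10) := by
  rw [toDigitsB, dif_neg (by omega)]

lemma foldl_toDigitsB (k : Nat) : ∀ n : Int, n.toNat ≤ k → ∀ acc : Int,
    (toDigitsB n).foldl (fun r d => r * 10 + d) acc = pyReverseGo n acc := by
  induction k with
  | zero =>
    intro n hn acc
    have h0 : n ≤ 0 := by omega
    rw [toDigitsB, dif_pos h0, pyReverseGo, dif_neg (by omega)]
    rfl
  | succ k ih =>
    intro n hn acc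
    by_cases h0 : n ≤ 0
    · rw [toDigitsB, dif_pos h0, pyReverseGo, dif_neg (by omega)]
      rfl
    · have hpos : 0 < n := by omega
      rw [toDigitsB_pos n hpos, List.foldl_cons, pyReverseGo, dif_pos hpos]
      have hfd : PySem.Int.floordiv n 10 = n / 10 :=
        PySem.Int.floordiv_eq_ediv_of_pos (by norm_num)
      apply ih
      rw [hfd]
      omega

lemma fromDigits_eq_pyReverse (n : Int) :
    (toDigitsB n).foldl (fun r d => r * 10 + d) 0 = pyReverse n :=
  foldl_toDigitsB n.toNat n le_rfl 0

lemma allOdd_toDigitsB (k : Nat) : ∀ m : Int, m.toNat ≤ k →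
    (toDigitsB m).all (fun d => PySem.Int.mod d 2 == 1) = pyOddDigitsGo m := by
  induction k with
  | zero =>
    intro m hm
    have h0 : m ≤ 0 := by omega
    rw [toDigitsB, dif_pos h0, pyOddDigitsGo, dif_neg (by omega)]
    rfl
  | succ k ih =>
    intro m hm
    by_cases h0 : m ≤ 0
    · rw [toDigitsB, dif_pos h0, pyOddDigitsGo, dif_neg (by omega)]
      rfl
    · have hpos : 0 < m := by omega
      rw [toDigitsB_pos m hpos, List.all_cons, pyOddDigitsGo, dif_pos hpos]
      have hfd : PySem.Int.floordiv m 10 = m / 10 :=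
        PySem.Int.floordiv_eq_ediv_of_pos (by norm_num)
      have hm2 : PySem.Int.mod (PySem.Int.mod m 10) 2 = (m % 10) % 2 := by
        rw [PySem.Int.mod_eq_emod_of_pos (by norm_num : (0:Int) < 10),
            PySem.Int.mod_eq_emod_of_pos (by norm_num : (0:Int) < 2)]
      by_cases hc : (m % 10) % 2 = 0
      · have h1 : (PySem.Int.mod (PySem.Int.mod m 10) 2 == 0) = true := by
          rw [hm2]; simpa using hc
        have h2 : (PySem.Int.mod (PySem.Int.mod m 10) 2 == 1) = false := by
          rw [hm2]; simp; omega
        rw [if_pos h1]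
        simp only [h2, Bool.false_and]
      · have h1 : (PySem.Int.mod (PySem.Int.mod m 10) 2 == 0) = false := by
          rw [hm2]; simpa using hc
        have h2 : (PySem.Int.mod (PySem.Int.mod m 10) 2 == 1) = true := by
          rw [hm2]; simp; omega
        rw [if_neg (by rw [h1]; exact Bool.false_ne_true), h2, Bool.true_and]
        apply ih
        rw [hfd]
        omega

lemma bStep_eq (count i : Int) (hi : 1 ≤ i) :
    bStep count i = count + 2 * gContrib i := by
  have hpos : 0 < i := by omega
  have hds := toDigitsB_pos i hpos
  simp only [bStep, hds, List.headD_cons, ne_eq, List.cons_ne_nil, not_false_iff, true_and]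
  by_cases hm : PySem.Int.mod i 10 = 0
  · rw [if_neg (by simpa using hm)]
    have hRf : py_is_reversible i = false := by
      rw [py_is_reversible, if_pos (by simpa using hm)]
    rw [gContrib, if_neg (by rintro ⟨_, hR⟩; rw [hRf] at hR; exact absurd hR (by simp))]
    ring
  · rw [if_pos (by simpa using hm)]
    have hr := fromDigits_eq_pyReverse i
    have hall := allOdd_toDigitsB (i + pyReverse i).toNat (i + pyReverse i) le_rfl
    have hRe : py_is_reversible i = pyOddDigitsGo (i + pyReverse i) := by
      rw [py_is_reversible, if_neg (by simpa using hm)]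
    rw [gContrib, ← hds]
    simp only [hr, hall, ← hRe]
    split_ifs <;> ring

lemma foldl_bStep (l : List Int) (hl : ∀ i ∈ l, 1 ≤ i) : ∀ a : Int,
    l.foldl bStep a = a + 2 * (l.map gContrib).sum := by
  induction l with
  | nil => intro a; simp
  | cons x t ih =>
    intro a
    rw [List.foldl_cons, bStep_eq a x (hl x List.mem_cons_self),
        ih (fun i hi => hl i (List.mem_cons_of_mem x hi))]
    simp only [List.map_cons, List.sum_cons]
    ring

-- ===== VERDICT (by name: the statement is the Claim_ definition above) =====
theorem reversable_numbers_below_spec : Claim_equal_reversable_numbers_below := by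
  intro n _
  show reversable_numbers_below n = reversable_numbers_below_alt n
  rw [reversable_numbers_below_alt,
      foldl_bStep _ (fun i hi => ((PySem.List.mem_pyRange_one).mp hi).1) 0,
      reversable_numbers_below, (foldInv_all n).2]
  ring
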